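-- pv_equiv track=rewrite | github.com/imteekay/algorithms | interview_training/leetcode/easy/n_repeated_element_in_size_2n_array/n_repeated_element_in_size_2n_array.py | n_repeated_element_in_size_2n_array
-- ===== SOURCE A (Python) =====
-- def n_repeated_element_in_size_2n_array(A):
--     map_counter = {}
--
--     for number in A:
--         if number in map_counter:
--             map_counter[number] += 1
--             return number
--         else:
--             map_counter[number] = 1
-- ===== SOURCE B (Python) =====
-- def n_repeated_element_in_size_2n_array(A):
--     for i in range(len(A)):
--         for j in range(i):
--             if A[j] == A[i]:
--                 return A[i]
-- ===== Notes on version B (the rewrite author's own statement) =====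
-- stated objective: alternative
-- what changed: Replaces the dict of counts with an index-based nested loop that checks each element against the prefix before it, returning the first element already seen; no auxiliary data structure is maintained.
-- outside the precondition, e.g. on n_repeated_element_in_size_2n_array([1, 2, 3]): A returns None, B returns None
import Mathlib
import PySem

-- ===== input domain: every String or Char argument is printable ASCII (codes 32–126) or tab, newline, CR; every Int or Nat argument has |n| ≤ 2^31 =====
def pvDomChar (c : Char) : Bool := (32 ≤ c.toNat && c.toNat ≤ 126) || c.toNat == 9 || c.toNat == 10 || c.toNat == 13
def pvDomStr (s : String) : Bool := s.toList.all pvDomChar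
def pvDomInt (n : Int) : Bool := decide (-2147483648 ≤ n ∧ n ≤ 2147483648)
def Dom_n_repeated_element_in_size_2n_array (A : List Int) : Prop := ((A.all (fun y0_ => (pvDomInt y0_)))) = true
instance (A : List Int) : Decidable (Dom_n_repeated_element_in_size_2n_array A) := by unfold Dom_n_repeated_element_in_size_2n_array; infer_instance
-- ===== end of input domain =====

-- B replaces the dict of counts with an index-based nested loop over the prefix; same first duplicate in scan order.

-- ===== PORT A =====
-- A's loop: keep a dict map_counter; return the first element already present as a key.
-- (0 is a placeholder for Python's implicit 'return None', unreachable under Pre_.)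
def nRepGoA (d : PySem.Dict Int Int) (l : List Int) : Int :=
  match l with
  | [] => 0
  | x :: xs =>
    if (d.get? x).isSome then x
    else nRepGoA (d.insert x 1) xs

def n_repeated_element_in_size_2n_array (A : List Int) : Int :=
  nRepGoA (PySem.Dict.empty) A

-- ===== PORT B =====
-- B's loops: for i in range(len(A)): for j in range(i): if A[j] == A[i]: return A[i]
def nRepGoB (A : List Int) (i : Nat) : Int :=
  if _h : i < A.length then
    if (List.range i).any (fun j => A.getD j 0 == A.getD i 0) then A.getD i 0
    else nRepGoB A (i + 1)
  else 0
termination_by A.length - i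

def n_repeated_element_in_size_2n_array_alt (A : List Int) : Int :=
  nRepGoB A 0

-- ===== PRECONDITION & SPEC =====
-- Pre_ excludes lists with no repeated element: there Python's A falls off the loop and
-- returns None, which is not a value of the declared int return type (B does the same).
def Pre_n_repeated_element_in_size_2n_array (A : List Int) : Prop := ¬ A.Nodup
instance (A : List Int) : Decidable (Pre_n_repeated_element_in_size_2n_array A) := by unfold Pre_n_repeated_element_in_size_2n_array; infer_instance
def pvWitness_n_repeated_element_in_size_2n_array : List Int := [1, 2, 2]

def Spec_n_repeated_element_in_size_2n_array (A : List Int) (out : Int) : Prop := out = n_repeated_element_in_size_2n_array_alt A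
instance (A : List Int) (out : Int) : Decidable (Spec_n_repeated_element_in_size_2n_array A out) := by unfold Spec_n_repeated_element_in_size_2n_array; infer_instance

-- ===== CLAIM (what is proved, stated in full; the proofs are below) =====
def Claim_equal_n_repeated_element_in_size_2n_array : Prop := ∀ (A : List Int), Dom_n_repeated_element_in_size_2n_array A → Pre_n_repeated_element_in_size_2n_array A → Spec_n_repeated_element_in_size_2n_array A (n_repeated_element_in_size_2n_array A)

-- ===== LEMMAS AND PROOFS =====

theorem nRep_inv (rest : List Int) :
    ∀ (A : List Int) (i : Nat) (d : PySem.Dict Int Int),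
      rest = A.drop i →
      (∀ x : Int, (d.get? x).isSome = true ↔ ∃ j, j < i ∧ A.getD j 0 = x) →
      nRepGoA d rest = nRepGoB A i := by
  induction rest with
  | nil =>
    intro A i d hrest _
    have hlen : A.length ≤ i := by
      have := congrArg List.length hrest
      simp [List.length_drop] at this
      omega
    rw [nRepGoB]
    simp [nRepGoA, Nat.not_lt_of_le hlen]
  | cons x xs ih =>
    intro A i d hrest hd
    have hlen : i < A.length := by
      by_contra h
      rw [List.drop_eq_nil_of_le (by omega)] at hrest
      simp at hrest
    have hx : A.getD i 0 = x := by
      have h1 : (A.drop i).getD 0 0 = A.getD i 0 := by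
        simp [List.getD, List.getElem?_drop]
      rw [← hrest] at h1
      simpa using h1.symm
    have hxs : xs = A.drop (i + 1) := by
      have := congrArg (List.drop 1) hrest
      simpa [List.drop_drop, Nat.add_comm] using this
    have hany : ((List.range i).any (fun j => A.getD j 0 == x) = true) ↔
        ((d.get? x).isSome = true) := by
      rw [hd x, List.any_eq_true]
      constructor
      · rintro ⟨j, hj, hje⟩
        exact ⟨j, by simpa using hj, by simpa using hje⟩
      · rintro ⟨j, hj, hje⟩
        exact ⟨j, by simpa using hj, by simpa using hje⟩
    rw [nRepGoB]
    simp only [hlen, dif_pos, hx]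
    by_cases hmem : (d.get? x).isSome = true
    · rw [if_pos (hany.mpr hmem)]
      simp [nRepGoA, hmem]
    · rw [if_neg (fun h => hmem (hany.mp h))]
      simp only [nRepGoA]
      rw [if_neg (by simpa using hmem)]
      apply ih A (i + 1) _ hxs
      intro y
      rw [PySem.Dict.get?_insert]
      constructor
      · intro h
        by_cases hyx : y = x
        · exact ⟨i, by omega, hyx ▸ hx⟩
        · rw [if_neg hyx] at h
          obtain ⟨j, hj, hje⟩ := (hd y).mp h
          exact ⟨j, by omega, hje⟩
      · rintro ⟨j, hj, hje⟩
        by_cases hyx : y = x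
        · simp [hyx]
        · rw [if_neg hyx]
          rcases Nat.lt_or_ge j i with hji | hji
          · exact (hd y).mpr ⟨j, hji, hje⟩
          · exfalso; have : j = i := by omega
            exact hyx (by rw [← hje, this, hx])

theorem nRep_main (A : List Int) : n_repeated_element_in_size_2n_array A = n_repeated_element_in_size_2n_array_alt A := by
  unfold n_repeated_element_in_size_2n_array n_repeated_element_in_size_2n_array_alt
  apply nRep_inv A A 0 PySem.Dict.empty (by simp)
  intro x
  simp [PySem.Dict.get?_empty]

-- ===== VERDICT (by name: the statement is the Claim_ definition above) =====
theorem n_repeated_element_in_size_2n_array_spec : Claim_equal_n_repeated_element_in_size_2n_array := by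
  intro A _ _
  exact nRep_main A
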